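-- pv_equiv track=rewrite | github.com/sunny2309/HackerRank | Competitions/RookieRank4/winning_hand_of_cards.py | winningHands
-- ===== SOURCE A (Python) =====
-- import sys,itertools
--
-- def winningHands(m, x, a):
--     # Complete this function
--     count = 0
--     if m == 1:
--         count += sum([len(list(itertools.combinations(a,i))) for i in range(1,len(a)+1)])
--         count = 0
--         return count
--     elif len(set(a)) == 1 and a[0] % m == x:
--         count += len(a)
--     else:
--         count += sum([(1 if t %m == x else 0) for t in a])
--     for i in range(2,len(a)+1):
--         for j in itertools.combinations(a,i):
--             if len(set(j)) == 1:
--                 count += 1 if pow(j[0],len(j)) % m == x else 0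
--                 continue
--             p = 1
--             for k in j:
--                 p *= k
--             count += 1 if p % m == x else 0
--     return count
-- ===== SOURCE B (Python) =====
-- def winningHands(m, x, a):
--     # DP over residues mod m: dp[r] = number of non-empty sub-hands whose
--     # product is congruent to r (mod m).  O(n*m) instead of O(2^n * n).
--     if m == 1:
--         return 0
--     dp = {}
--     for v in a:
--         new = dict(dp)
--         for r, c in dp.items():
--             nr = (r * v) % m
--             new[nr] = new.get(nr, 0) + c
--         r0 = v % m
--         new[r0] = new.get(r0, 0) + 1
--         dp = new
--     return dp.get(x, 0)
-- ===== Notes on version B (the rewrite author's own statement) =====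
-- stated objective: faster
-- what changed: Replaces the exponential enumeration of all combinations (per size, with a product loop per combination) by a single-pass dynamic program over residues mod m, counting subsets per residue; the m==1 early-return-0 behaviour is kept.
import Mathlib
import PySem

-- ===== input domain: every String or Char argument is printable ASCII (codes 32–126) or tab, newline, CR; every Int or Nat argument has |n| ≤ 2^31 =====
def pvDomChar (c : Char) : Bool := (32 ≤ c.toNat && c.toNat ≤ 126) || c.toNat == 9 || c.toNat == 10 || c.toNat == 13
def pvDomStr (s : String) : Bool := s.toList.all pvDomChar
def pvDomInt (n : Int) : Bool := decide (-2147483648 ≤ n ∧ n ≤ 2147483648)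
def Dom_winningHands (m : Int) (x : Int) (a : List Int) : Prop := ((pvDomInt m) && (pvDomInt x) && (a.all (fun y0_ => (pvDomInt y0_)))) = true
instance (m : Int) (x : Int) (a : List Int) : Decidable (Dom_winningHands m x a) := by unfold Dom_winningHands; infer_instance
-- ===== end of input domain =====

-- B replaces A's exponential enumeration of all combinations by a one-pass DP over residues mod m.

-- ===== PORT A =====
-- itertools.combinations(a, i) is PySem.List.combinations a i
def winningHands (m : Int) (x : Int) (a : List Int) : Int :=
  if m == 1 then
    -- count += sum([...]); count = 0; return count  (the sum is computed and then discarded)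
    let count : Int := 0 + ((PySem.List.pyRange 1 ((a.length : Int) + 1) 1).map
      (fun i => ((PySem.List.combinations a i.toNat).length : Int))).sum
    let count : Int := 0
    count
  else
    -- a[0] is only reached (Python short-circuit) when len(set(a)) == 1, so a is nonempty there;
    -- (pyGet? a 0).getD 0 equals a[0] in that case
    let count : Int :=
      if (PySem.Set.ofList a).length == 1 && (PySem.Int.mod ((PySem.List.pyGet? a 0).getD 0) m == x) then
        0 + (a.length : Int)
      else
        0 + (a.map (fun t => if PySem.Int.mod t m == x then (1 : Int) else 0)).sum
    (PySem.List.pyRange 2 ((a.length : Int) + 1) 1).foldl (fun count i =>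
      (PySem.List.combinations a i.toNat).foldl (fun count j =>
        if (PySem.Set.ofList j).length == 1 then
          count + (if PySem.Int.mod (((PySem.List.pyGet? j 0).getD 0) ^ j.length) m == x then 1 else 0)
        else
          let p := j.foldl (fun p k => p * k) 1
          count + (if PySem.Int.mod p m == x then 1 else 0)) count) count

-- ===== PORT B =====
def winningHands_alt (m : Int) (x : Int) (a : List Int) : Int :=
  if m == 1 then 0
  else
    let dp := a.foldl (fun dp v =>
      let new := dp.items.foldl (fun nd q =>
        nd.insert (PySem.Int.mod (q.1 * v) m) (nd.getD (PySem.Int.mod (q.1 * v) m) 0 + q.2)) dp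
      new.insert (PySem.Int.mod v m) (new.getD (PySem.Int.mod v m) 0 + 1))
      (PySem.Dict.empty : PySem.Dict Int Int)
    dp.getD x 0

-- ===== PRECONDITION & SPEC =====
-- Pre_ excludes m = 0 with a nonempty, where Python's '%' raises ZeroDivisionError (in both A and B).
def Pre_winningHands (m : Int) (x : Int) (a : List Int) : Prop := m ≠ 0 ∨ a = []
instance (m : Int) (x : Int) (a : List Int) : Decidable (Pre_winningHands m x a) := by unfold Pre_winningHands; infer_instance
def pvWitness_winningHands : Int × Int × List Int := (7, 1, [2, 3, 4])

def Spec_winningHands (m : Int) (x : Int) (a : List Int) (out : Int) : Prop := out = winningHands_alt m x a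
instance (m : Int) (x : Int) (a : List Int) (out : Int) : Decidable (Spec_winningHands m x a out) := by unfold Spec_winningHands; infer_instance

-- ===== CLAIM (what is proved, stated in full; the proofs are below) =====
def Claim_equal_winningHands : Prop := ∀ (m : Int) (x : Int) (a : List Int), Dom_winningHands m x a → Pre_winningHands m x a → Spec_winningHands m x a (winningHands m x a)

-- ===== LEMMAS AND PROOFS =====

-- the common specification: number of nonempty sub-multisets (as sublists) with product ≡ x (mod m)
def pvQ (m x : Int) (t : List Int) : Bool := !t.isEmpty && (PySem.Int.mod t.prod m == x)
def pvCnt (m x : Int) (p : List Int) : Nat := p.sublists.countP (pvQ m x)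

-- Python's floor-mod absorbs a prior floor-mod on a factor
theorem pv_mod_mul_left (a b m : Int) :
    PySem.Int.mod (PySem.Int.mod a m * b) m = PySem.Int.mod (a * b) m := by
  simp only [PySem.Int.mod]
  have h : a.fmod m = a + m * (-(a.fdiv m)) := by
    have := Int.fmod_add_mul_fdiv a m; linarith
  rw [h]
  have h2 : (a + m * (-(a.fdiv m))) * b = a * b + m * ((-(a.fdiv m)) * b) := by ring
  rw [h2, Int.add_mul_fmod_self_left]

theorem pv_sum_map_add (K : List Int) (f g : Int → Nat) :
    (K.map (fun k => f k + g k)).sum = (K.map f).sum + (K.map g).sum := by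
  induction K with
  | nil => simp
  | cons k K ih => simp [ih]; omega

theorem pv_delta (K : List Int) (cond : Int → Bool) (e : Int) (hK : K.Nodup) (he : e ∈ K) :
    (K.map (fun k => if cond k && (e == k) then 1 else 0)).sum = (if cond e then 1 else 0) := by
  induction K with
  | nil => simp at he
  | cons k K ih =>
    rcases List.nodup_cons.mp hK with ⟨hk, hK'⟩
    rw [List.map_cons, List.sum_cons]
    rcases List.mem_cons.mp he with rfl | he'
    · have hz : (K.map (fun k' => if cond k' && (e == k') then 1 else 0)).sum = 0 := by
        apply List.sum_eq_zero
        intro y hy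
        rcases List.mem_map.mp hy with ⟨k', hk', rfl⟩
        have hne : (e == k') = false := by
          rw [beq_eq_false_iff_ne]; rintro rfl; exact hk hk'
        rw [hne, Bool.and_false]
        rfl
      rw [hz, beq_self_eq_true, Bool.and_true, Nat.add_zero]
    · have hne : (e == k) = false := by
        rw [beq_eq_false_iff_ne]; rintro rfl; exact hk he'
      rw [hne, Bool.and_false, ih hK' he']
      simp

theorem pv_fiber (K : List Int) (hK : K.Nodup) (cond : Int → Bool) (h : List Int → Int) :
    ∀ (L : List (List Int)), (∀ t ∈ L, h t ∈ K) →
      (K.map (fun k => if cond k then L.countP (fun t => h t == k) else 0)).sum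
        = L.countP (fun t => cond (h t)) := by
  intro L
  induction L with
  | nil => intro _; simp [List.countP_nil]
  | cons t L ih =>
    intro hmem
    have ht : h t ∈ K := hmem t (by simp)
    have hL : ∀ u ∈ L, h u ∈ K := fun u hu => hmem u (by simp [hu])
    have step : ∀ k, (if cond k then ((t :: L).countP (fun u => h u == k)) else 0)
        = (if cond k then L.countP (fun u => h u == k) else 0) + (if cond k && (h t == k) then 1 else 0) := by
      intro k
      by_cases hc : cond k
      · by_cases he : (h t == k) = true
        · simp [hc, List.countP_cons, he]
        · simp only [Bool.not_eq_true] at he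
          simp [hc, List.countP_cons, he]
      · simp [hc]
    calc (K.map (fun k => if cond k then ((t :: L).countP (fun u => h u == k)) else 0)).sum
        = (K.map (fun k => (if cond k then L.countP (fun u => h u == k) else 0) + (if cond k && (h t == k) then 1 else 0))).sum := by
          congr 1; exact List.map_congr_left (fun k _ => step k)
      _ = (K.map (fun k => if cond k then L.countP (fun u => h u == k) else 0)).sum
            + (K.map (fun k => if cond k && (h t == k) then 1 else 0)).sum := pv_sum_map_add K _ _
      _ = L.countP (fun u => cond (h u)) + (if cond (h t) then 1 else 0) := by
          rw [ih hL, pv_delta K cond (h t) hK ht]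
      _ = (t :: L).countP (fun u => cond (h u)) := by
          rw [List.countP_cons]

theorem pv_countP_split (l : List (List Int)) (p : List Int → Bool) :
    l.countP p = l.countP (fun t => p t && !t.isEmpty) + l.countP (fun t => p t && t.isEmpty) := by
  induction l with
  | nil => simp [List.countP_nil]
  | cons t l ih =>
    simp only [List.countP_cons]
    by_cases he : t.isEmpty <;> by_cases hp : p t <;> simp [he, hp] <;> omega

theorem pv_count_nil_sublists (p : List Int) : p.sublists.count ([] : List Int) = 1 := by
  induction p using List.reverseRecOn with
  | nil => simp
  | append_singleton p v ih =>
    rw [List.sublists_concat]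
    rw [List.count_append, ih]
    have : ((p.sublists.map (fun t => t ++ [v])).count ([] : List Int)) = 0 := by
      rw [List.count_eq_zero]
      intro hmem
      rcases List.mem_map.mp hmem with ⟨t, _, ht⟩
      simp at ht
    omega

theorem pv_countP_empty (l : List (List Int)) (p : List Int → Bool) :
    l.countP (fun t => p t && t.isEmpty) = if p [] then l.count ([] : List Int) else 0 := by
  induction l with
  | nil => simp [List.countP_nil]
  | cons t l ih =>
    rcases t with _ | ⟨y, t⟩
    · simp only [List.countP_cons, List.count_cons, ih]
      by_cases hp : p [] <;> simp [hp]
    · simp only [List.countP_cons, List.count_cons, ih]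
      by_cases hp : p [] <;> simp [hp]

-- counting over sublists of p ++ [v]
theorem pv_cnt_concat (m r v : Int) (p : List Int) :
    pvCnt m r (p ++ [v])
      = pvCnt m r p
        + (p.sublists.filter (fun t => !t.isEmpty)).countP (fun t => PySem.Int.mod (t.prod * v) m == r)
        + (if PySem.Int.mod v m == r then 1 else 0) := by
  unfold pvCnt
  rw [List.sublists_concat, List.countP_append]
  have hmap : (p.sublists.map (fun t => t ++ [v])).countP (pvQ m r)
      = p.sublists.countP (fun t => PySem.Int.mod (t.prod * v) m == r) := by
    rw [List.countP_map]
    apply List.countP_congr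
    intro t _
    simp [pvQ, Function.comp]
  rw [hmap]
  rw [pv_countP_split p.sublists (fun t => PySem.Int.mod (t.prod * v) m == r)]
  have h1 : p.sublists.countP (fun t => (PySem.Int.mod (t.prod * v) m == r) && !t.isEmpty)
      = (p.sublists.filter (fun t => !t.isEmpty)).countP (fun t => PySem.Int.mod (t.prod * v) m == r) := by
    rw [List.countP_filter]
  have h2 : p.sublists.countP (fun t => (PySem.Int.mod (t.prod * v) m == r) && t.isEmpty)
      = if PySem.Int.mod v m == r then 1 else 0 := by
    rw [pv_countP_empty, pv_count_nil_sublists]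
    simp
  rw [h1, h2]
  omega

def pvStep (m : Int) (dp : PySem.Dict Int Int) (v : Int) : PySem.Dict Int Int :=
  let new := dp.items.foldl (fun nd q =>
    nd.insert (PySem.Int.mod (q.1 * v) m) (nd.getD (PySem.Int.mod (q.1 * v) m) 0 + q.2)) dp
  new.insert (PySem.Int.mod v m) (new.getD (PySem.Int.mod v m) 0 + 1)

theorem pv_inner (m v : Int) (l : List (Int × Int)) :
    ∀ (nd : PySem.Dict Int Int) (r : Int),
    (l.foldl (fun nd q =>
        nd.insert (PySem.Int.mod (q.1 * v) m) (nd.getD (PySem.Int.mod (q.1 * v) m) 0 + q.2)) nd).getD r 0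
      = nd.getD r 0 + (l.map (fun q => if PySem.Int.mod (q.1 * v) m == r then q.2 else 0)).sum := by
  induction l with
  | nil => intro nd r; simp
  | cons q l ih =>
    intro nd r
    rw [List.foldl_cons, List.map_cons, List.sum_cons, ih, PySem.Dict.getD_insert]
    by_cases h : r = PySem.Int.mod (q.1 * v) m
    · subst h
      rw [if_pos rfl, beq_self_eq_true, if_pos rfl]
      omega
    · rw [if_neg h]
      have hb : (PySem.Int.mod (q.1 * v) m == r) = false := by
        rw [beq_eq_false_iff_ne]; exact fun hc => h hc.symm
      rw [hb]
      simp only [Bool.false_eq_true, if_false]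
      omega

theorem pv_step_nodup (m v : Int) (dp : PySem.Dict Int Int) (h : dp.keys.Nodup) :
    (pvStep m dp v).keys.Nodup := by
  unfold pvStep
  apply PySem.Dict.nodup_keys_insert
  exact PySem.Dict.nodup_keys_foldl_insert_key dp.items
    (fun q => PySem.Int.mod (q.1 * v) m)
    (fun nd q => nd.getD (PySem.Int.mod (q.1 * v) m) 0 + q.2) dp h

theorem pv_mem_keys_of_cnt_pos (m : Int) (p : List Int) (dp : PySem.Dict Int Int)
    (hinv : ∀ r, dp.getD r 0 = (pvCnt m r p : Int)) (t : List Int)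
    (ht : t ∈ p.sublists) (hne : t.isEmpty = false) :
    PySem.Int.mod t.prod m ∈ dp.keys := by
  by_contra hmem
  have hc : dp.contains (PySem.Int.mod t.prod m) = false := by
    cases hcc : dp.contains (PySem.Int.mod t.prod m) with
    | false => rfl
    | true => exact absurd ((PySem.Dict.contains_iff_mem_keys dp _).mp hcc) hmem
  have h0 : dp.getD (PySem.Int.mod t.prod m) 0 = 0 := PySem.Dict.getD_of_not_contains dp 0 hc
  have hpos : 0 < pvCnt m (PySem.Int.mod t.prod m) p := by
    apply List.countP_pos_iff.mpr
    exact ⟨t, ht, by simp [pvQ, hne]⟩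
  rw [hinv] at h0
  omega

theorem pv_step_getD (m v : Int) (p : List Int) (dp : PySem.Dict Int Int)
    (hnd : dp.keys.Nodup) (hinv : ∀ r, dp.getD r 0 = (pvCnt m r p : Int)) :
    ∀ r, (pvStep m dp v).getD r 0 = (pvCnt m r (p ++ [v]) : Int) := by
  have hcnt : ∀ k : Int, (p.sublists.filter (fun t => !t.isEmpty)).countP (fun t => PySem.Int.mod t.prod m == k) = pvCnt m k p := by
    intro k
    unfold pvCnt
    rw [List.countP_filter]
    apply List.countP_congr
    intro t _
    simp [pvQ]
    tauto
  have hnew : ∀ rr : Int,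
      (dp.items.foldl (fun nd q =>
          nd.insert (PySem.Int.mod (q.1 * v) m) (nd.getD (PySem.Int.mod (q.1 * v) m) 0 + q.2)) dp).getD rr 0
        = (pvCnt m rr p : Int)
          + (((p.sublists.filter (fun t => !t.isEmpty)).countP (fun t => PySem.Int.mod (t.prod * v) m == rr) : Nat) : Int) := by
    intro rr
    rw [pv_inner m v dp.items dp rr, hinv rr]
    congr 1
    rw [PySem.Dict.items_eq_map_keys dp hnd 0, List.map_map]
    have hterm : ∀ k ∈ dp.keys,
        ((fun q : Int × Int => if PySem.Int.mod (q.1 * v) m == rr then q.2 else 0) ∘ fun k => (k, dp.getD k 0)) k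
          = (((if PySem.Int.mod (k * v) m == rr then pvCnt m k p else 0 : Nat)) : Int) := by
      intro k _
      simp only [Function.comp]
      rw [hinv k]
      by_cases hc : (PySem.Int.mod (k * v) m == rr) = true
      · rw [if_pos hc, if_pos hc]
      · rw [if_neg hc, if_neg hc]
        rfl
    rw [List.map_congr_left hterm]
    have hcast : dp.keys.map (fun k => (((if PySem.Int.mod (k * v) m == rr then pvCnt m k p else 0 : Nat)) : Int))
        = List.map (fun n : Nat => (n : Int)) (dp.keys.map (fun k => if PySem.Int.mod (k * v) m == rr then pvCnt m k p else 0)) := by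
      rw [List.map_map]
      exact List.map_congr_left (fun k _ => rfl)
    rw [hcast, ← Nat.cast_list_sum]
    congr 1
    have hKmem : ∀ t ∈ p.sublists.filter (fun t => !t.isEmpty),
        (fun t : List Int => PySem.Int.mod t.prod m) t ∈ dp.keys := by
      intro t ht
      rcases List.mem_filter.mp ht with ⟨hts, hne⟩
      exact pv_mem_keys_of_cnt_pos m p dp hinv t hts (by simpa using hne)
    have hfib := pv_fiber dp.keys hnd (fun k => PySem.Int.mod (k * v) m == rr)
        (fun t => PySem.Int.mod t.prod m) (p.sublists.filter (fun t => !t.isEmpty)) hKmem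
    have hrepl : dp.keys.map (fun k => if PySem.Int.mod (k * v) m == rr then pvCnt m k p else 0)
        = dp.keys.map (fun k => if PySem.Int.mod (k * v) m == rr then
            (p.sublists.filter (fun t => !t.isEmpty)).countP (fun t => PySem.Int.mod t.prod m == k) else 0) :=
      List.map_congr_left (fun k _ => by rw [hcnt k])
    rw [hrepl, hfib]
    apply List.countP_congr
    intro t _
    simp only [pv_mod_mul_left]
  intro r
  unfold pvStep
  rw [PySem.Dict.getD_insert, hnew (PySem.Int.mod v m), hnew r, pv_cnt_concat m r v p]
  by_cases hr : r = PySem.Int.mod v m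
  · subst hr
    rw [beq_self_eq_true, if_pos rfl, if_pos rfl]
    push_cast
    ring
  · have hb : (PySem.Int.mod v m == r) = false := by
      rw [beq_eq_false_iff_ne]; exact fun hc => hr hc.symm
    rw [if_neg hr, hb]
    simp only [Bool.false_eq_true, if_false]
    push_cast
    ring

theorem pv_B_loop (m : Int) (a : List Int) :
    (a.foldl (pvStep m) (PySem.Dict.empty : PySem.Dict Int Int)).keys.Nodup ∧
    ∀ r, (a.foldl (pvStep m) (PySem.Dict.empty : PySem.Dict Int Int)).getD r 0 = (pvCnt m r a : Int) := by
  induction a using List.reverseRecOn with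
  | nil =>
    constructor
    · simp [PySem.Dict.keys]
      exact PySem.Dict.nodup_keys_empty
    · intro r
      have : pvCnt m r [] = 0 := by
        simp [pvCnt, List.sublists_nil, List.countP_cons, List.countP_nil, pvQ]
      simp [this, PySem.Dict.getD_empty]
  | append_singleton p v ih =>
    rw [List.foldl_append, List.foldl_cons, List.foldl_nil]
    rcases ih with ⟨hnd, hinv⟩
    exact ⟨pv_step_nodup m v _ hnd, pv_step_getD m v p _ hnd hinv⟩

theorem pv_B_eq (m x : Int) (a : List Int) (hm : (m == 1) = false) :
    winningHands_alt m x a = (pvCnt m x a : Int) := by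
  unfold winningHands_alt
  rw [hm]
  simp only [Bool.false_eq_true, if_false]
  have hfold : a.foldl (fun dp v =>
      let new := dp.items.foldl (fun nd q =>
        nd.insert (PySem.Int.mod (q.1 * v) m) (nd.getD (PySem.Int.mod (q.1 * v) m) 0 + q.2)) dp
      new.insert (PySem.Int.mod v m) (new.getD (PySem.Int.mod v m) 0 + 1))
      (PySem.Dict.empty : PySem.Dict Int Int) = a.foldl (pvStep m) PySem.Dict.empty := rfl
  rw [hfold]
  exact (pv_B_loop m a).2 x

-- ---------- A side ----------

-- Σ_i countP (combinations l i) p over all sizes = countP over sublists'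
theorem pv_SC (l : List Int) : ∀ (p : List Int → Bool),
    ((List.range (l.length + 1)).map (fun i => (PySem.List.combinations l i).countP p)).sum
      = l.sublists'.countP p := by
  induction l with
  | nil =>
    intro p
    simp [PySem.List.combinations_zero, List.countP]
  | cons y l ih =>
    intro p
    have hlen : (y :: l).length + 1 = l.length + 1 + 1 := by simp
    rw [hlen, List.range_succ_eq_map, List.map_cons, List.sum_cons, List.map_map]
    have hterm : ∀ i : Nat,
        ((fun i => (PySem.List.combinations (y :: l) i).countP p) ∘ Nat.succ) i
          = (PySem.List.combinations l i).countP (fun t => p (y :: t)) + (PySem.List.combinations l (i + 1)).countP p := by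
      intro i
      simp only [Function.comp, Nat.succ_eq_add_one]
      rw [PySem.List.combinations_cons_succ, List.countP_append, List.countP_map]
      rfl
    rw [List.map_congr_left (fun i _ => hterm i)]
    have hsplit : ((List.range (l.length + 1)).map
        (fun i => (PySem.List.combinations l i).countP (fun t => p (y :: t)) + (PySem.List.combinations l (i + 1)).countP p)).sum
      = ((List.range (l.length + 1)).map (fun i => (PySem.List.combinations l i).countP (fun t => p (y :: t)))).sum
        + ((List.range (l.length + 1)).map (fun i => (PySem.List.combinations l (i + 1)).countP p)).sum := by
      induction (List.range (l.length + 1)) with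
      | nil => simp
      | cons j js ihs => simp [ihs]; omega
    rw [hsplit, ih (fun t => p (y :: t))]
    -- the shifted sum
    have hshift : (PySem.List.combinations l 0).countP p
          + ((List.range (l.length + 1)).map (fun i => (PySem.List.combinations l (i + 1)).countP p)).sum
        = ((List.range (l.length + 1 + 1)).map (fun i => (PySem.List.combinations l i).countP p)).sum := by
      rw [List.range_succ_eq_map (n := l.length + 1), List.map_cons, List.sum_cons, List.map_map]
      rfl
    have htop : ((List.range (l.length + 1 + 1)).map (fun i => (PySem.List.combinations l i).countP p)).sum
        = ((List.range (l.length + 1)).map (fun i => (PySem.List.combinations l i).countP p)).sum := by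
      rw [List.range_succ (n := l.length + 1), List.map_append, List.sum_append]
      have : PySem.List.combinations l (l.length + 1) = [] :=
        PySem.List.combinations_eq_nil_of_length_lt (xs := l) (r := l.length + 1) (by omega)
      simp [this, List.countP_nil]
    have hzero : (PySem.List.combinations l 0).countP p = if p [] then 1 else 0 := by
      rw [PySem.List.combinations_zero]
      by_cases hp : p [] <;> simp [List.countP_cons, List.countP_nil, hp]
    have hzero' : (PySem.List.combinations (y :: l) 0).countP p = if p [] then 1 else 0 := by
      rw [PySem.List.combinations_zero]
      by_cases hp : p [] <;> simp [List.countP_cons, List.countP_nil, hp]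
    have hIH := ih p
    rw [List.sublists'_cons, List.countP_append, List.countP_map]
    have : l.sublists'.countP (p ∘ (fun t => y :: t)) = l.sublists'.countP (fun t => p (y :: t)) := rfl
    rw [this]
    omega

-- an all-equal nonempty list is a replicate
theorem pv_replicate_of_setlen_one (j : List Int) (h : (PySem.Set.ofList j).length = 1) :
    ∃ (e : Int) (n : Nat), j = List.replicate (n + 1) e := by
  rcases List.length_eq_one_iff.mp h with ⟨e, he⟩
  have hmem : ∀ y ∈ j, y = e := by
    intro y hy
    have : y ∈ PySem.Set.ofList j := (PySem.Set.mem_ofList j y).mpr hy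
    rw [he] at this
    simpa using this
  have hne : j ≠ [] := by
    rintro rfl
    simp [PySem.Set.ofList] at he
  rcases Nat.exists_eq_add_of_lt (List.length_pos_iff.mpr hne) with ⟨n, hn⟩
  refine ⟨e, n, ?_⟩
  rw [List.eq_replicate_iff]
  exact ⟨by omega, hmem⟩

theorem pv_branch_eq (m x : Int) (j : List Int) :
    (if (PySem.Set.ofList j).length == 1 then
       (if PySem.Int.mod (((PySem.List.pyGet? j 0).getD 0) ^ j.length) m == x then (1 : Int) else 0)
     else
       (if PySem.Int.mod (j.foldl (fun p k => p * k) 1) m == x then (1 : Int) else 0))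
    = (if PySem.Int.mod j.prod m == x then (1 : Int) else 0) := by
  by_cases h : (PySem.Set.ofList j).length = 1
  · rcases pv_replicate_of_setlen_one j h with ⟨e, n, rfl⟩
    have hget : (PySem.List.pyGet? (List.replicate (n + 1) e) 0).getD 0 = e := by
      rw [List.replicate_succ]
      simp [PySem.List.pyGet?, PySem.List.pyIdx?]
    have hlen : (List.replicate (n + 1) e).length = n + 1 := by simp
    rw [hget, hlen, List.prod_replicate]
    simp [h]
  · have : ((PySem.Set.ofList j).length == 1) = false := by simpa using h
    rw [this]
    simp only [Bool.false_eq_true, if_false]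
    rw [← List.prod_eq_foldl]

theorem pv_first_eq (m x : Int) (a : List Int) :
    (if (PySem.Set.ofList a).length == 1 && (PySem.Int.mod ((PySem.List.pyGet? a 0).getD 0) m == x) then
       0 + (a.length : Int)
     else
       0 + (a.map (fun t => if PySem.Int.mod t m == x then (1 : Int) else 0)).sum)
    = ((PySem.List.combinations a 1).countP (fun t => PySem.Int.mod t.prod m == x) : Int) := by
  rw [PySem.List.combinations_one, List.countP_map]
  have hcomp : ((fun t => PySem.Int.mod t.prod m == x) ∘ fun y => [y]) = fun t : Int => PySem.Int.mod t m == x := by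
    funext t; simp [Function.comp]
  rw [hcomp]
  by_cases h : ((PySem.Set.ofList a).length == 1 && (PySem.Int.mod ((PySem.List.pyGet? a 0).getD 0) m == x)) = true
  · rw [if_pos h]
    rcases Bool.and_eq_true_iff.mp h with ⟨h1, h2⟩
    rcases pv_replicate_of_setlen_one a (by simpa using h1) with ⟨e, n, rfl⟩
    have hget : (PySem.List.pyGet? (List.replicate (n + 1) e) 0).getD 0 = e := by
      rw [List.replicate_succ]
      simp [PySem.List.pyGet?, PySem.List.pyIdx?]
    rw [hget] at h2
    have : (List.replicate (n + 1) e).countP (fun t => PySem.Int.mod t m == x) = (List.replicate (n + 1) e).length := by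
      rw [List.countP_eq_length]
      intro b hb
      rw [List.eq_of_mem_replicate hb]
      exact h2
    rw [this]
    omega
  · rw [if_neg h]
    rw [PySem.List.sum_map_ite_one_zero (fun t : Int => PySem.Int.mod t m == x) a]
    simp

theorem pv_shift (a : List Int) (Q : List Int → Bool) (n : Nat) :
    ((List.range (n + 1 + 1)).map (fun i => (PySem.List.combinations a i).countP Q)).sum
      = (PySem.List.combinations a 0).countP Q + ((PySem.List.combinations a 1).countP Q
        + ((List.range n).map (fun k => (PySem.List.combinations a (k + 2)).countP Q)).sum) := by
  rw [List.range_succ_eq_map, List.map_cons, List.sum_cons, List.map_map]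
  congr 1
  rw [List.range_succ_eq_map, List.map_cons, List.sum_cons, List.map_map]
  rfl

theorem pv_A_eq (m x : Int) (a : List Int) (hm : (m == 1) = false) :
    winningHands m x a = (pvCnt m x a : Int) := by
  unfold winningHands
  rw [hm]
  simp only [Bool.false_eq_true, if_false]
  -- inner loop: count of combinations of size i with product ≡ x
  have hinner : ∀ (i : Int) (c : Int),
      (PySem.List.combinations a i.toNat).foldl (fun count j =>
        if (PySem.Set.ofList j).length == 1 then
          count + (if PySem.Int.mod (((PySem.List.pyGet? j 0).getD 0) ^ j.length) m == x then 1 else 0)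
        else
          count + (if PySem.Int.mod (j.foldl (fun p k => p * k) 1) m == x then 1 else 0)) c
      = c + (((PySem.List.combinations a i.toNat).countP (fun t => PySem.Int.mod t.prod m == x) : Nat) : Int) := by
    intro i c
    have hcongr : (PySem.List.combinations a i.toNat).foldl (fun count j =>
        if (PySem.Set.ofList j).length == 1 then
          count + (if PySem.Int.mod (((PySem.List.pyGet? j 0).getD 0) ^ j.length) m == x then 1 else 0)
        else
          count + (if PySem.Int.mod (j.foldl (fun p k => p * k) 1) m == x then 1 else 0)) c
      = (PySem.List.combinations a i.toNat).foldl (fun count j =>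
          count + (if PySem.Int.mod j.prod m == x then 1 else 0)) c := by
      apply PySem.List.foldl_congr_mem
      intro acc j hj
      rw [← pv_branch_eq m x j]
      by_cases h : ((PySem.Set.ofList j).length == 1) = true <;> simp [h]
    rw [hcongr, PySem.List.foldl_add (PySem.List.combinations a i.toNat)
      (fun j : List Int => if PySem.Int.mod j.prod m == x then (1 : Int) else 0) c]
    rw [PySem.List.sum_map_ite_one_zero]
  have houter : ∀ c : Int, (PySem.List.pyRange 2 ((a.length : Int) + 1) 1).foldl (fun count i =>
      (PySem.List.combinations a i.toNat).foldl (fun count j =>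
        if (PySem.Set.ofList j).length == 1 then
          count + (if PySem.Int.mod (((PySem.List.pyGet? j 0).getD 0) ^ j.length) m == x then 1 else 0)
        else
          count + (if PySem.Int.mod (j.foldl (fun p k => p * k) 1) m == x then 1 else 0)) count) c
      = c + ((PySem.List.pyRange 2 ((a.length : Int) + 1) 1).map
        (fun i => (((PySem.List.combinations a i.toNat).countP (fun t => PySem.Int.mod t.prod m == x) : Nat) : Int))).sum := by
    intro c
    rw [PySem.List.foldl_congr_mem _ _
      (fun count i => count + (((PySem.List.combinations a i.toNat).countP (fun t => PySem.Int.mod t.prod m == x) : Nat) : Int))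
      c (fun acc i hi => hinner i acc)]
    exact PySem.List.foldl_add _ _ c
  rw [houter _, pv_first_eq m x a]
  -- now everything is a Nat computation
  have hrange2 : (PySem.List.pyRange 2 ((a.length : Int) + 1) 1).map
      (fun i => (((PySem.List.combinations a i.toNat).countP (fun t => PySem.Int.mod t.prod m == x) : Nat) : Int))
    = (List.range (a.length - 1)).map (fun k => (((PySem.List.combinations a (k + 2)).countP (fun t => PySem.Int.mod t.prod m == x) : Nat) : Int)) := by
    rw [PySem.List.pyRange_one, List.map_map]
    have hlen : ((a.length : Int) + 1 - 2).toNat = a.length - 1 := by omega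
    rw [hlen]
    apply List.map_congr_left
    intro k hk
    simp only [Function.comp]
    have hx : ((2 : Int) + (k : Int)).toNat = k + 2 := by omega
    rw [hx]
  rw [hrange2]
  have hcast : (List.range (a.length - 1)).map (fun k => (((PySem.List.combinations a (k + 2)).countP (fun t => PySem.Int.mod t.prod m == x) : Nat) : Int))
      = List.map (fun n : Nat => (n : Int)) ((List.range (a.length - 1)).map (fun k => (PySem.List.combinations a (k + 2)).countP (fun t => PySem.Int.mod t.prod m == x))) := by
    rw [List.map_map]
    exact List.map_congr_left (fun k _ => rfl)
  rw [hcast, ← Nat.cast_list_sum]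
  rw [← Nat.cast_add]
  -- Nat goal: countP comb1 + Σ_{k<n-1} countP comb(k+2) = pvCnt m x a
  congr 1
  have hPQ : ∀ i : Nat, i ≠ 0 → (PySem.List.combinations a i).countP (fun t => PySem.Int.mod t.prod m == x)
      = (PySem.List.combinations a i).countP (pvQ m x) := by
    intro i hi
    apply List.countP_congr
    intro t ht
    have hlen := PySem.List.length_of_mem_combinations ht
    have : t.isEmpty = false := by
      cases t with
      | nil => rw [← hlen] at hi; simp at hi
      | cons u t => simp
    simp [pvQ, this]
  have hq0 : (PySem.List.combinations a 0).countP (pvQ m x) = 0 := by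
    rw [PySem.List.combinations_zero]
    simp [List.countP, List.countP.go, pvQ]
  have hcnt' : pvCnt m x a = a.sublists'.countP (pvQ m x) :=
    (List.sublists_perm_sublists' a).countP_eq (pvQ m x)
  rw [hcnt', ← pv_SC a (pvQ m x)]
  cases hn : a.length with
  | zero =>
    have hanil : a = [] := List.length_eq_zero_iff.mp hn
    subst hanil
    simp [PySem.List.combinations_nil_succ, PySem.List.combinations_zero, List.countP, List.countP.go, pvQ]
  | succ n =>
    rw [pv_shift a (pvQ m x) n, hq0, Nat.add_sub_cancel]
    rw [hPQ 1 (by omega)]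
    have e2 : ∀ k ∈ List.range n, (PySem.List.combinations a (k + 2)).countP (fun t => PySem.Int.mod t.prod m == x)
        = (PySem.List.combinations a (k + 2)).countP (pvQ m x) := fun k _ => hPQ (k + 2) (by omega)
    rw [List.map_congr_left e2]
    omega

-- ===== VERDICT (by name: the statement is the Claim_ definition above) =====
theorem winningHands_spec : Claim_equal_winningHands := by
  intro m x a _hdom _hpre
  unfold Spec_winningHands
  by_cases hm : (m == 1) = true
  · have hm' : m = 1 := by simpa using hm
    subst hm'
    unfold winningHands winningHands_alt
    simp
  · have hm' : (m == 1) = false := by simpa using hm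
    rw [pv_A_eq m x a hm', pv_B_eq m x a hm']
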